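-- pv_equiv track=rewrite | github.com/calvin-sykes/advent-of-code-2023 | day3.py | find_parts_symbols
-- ===== SOURCE A (Python) =====
-- def find_parts_symbols(engine_str):
--     parts = []
--     symbols = []
--
--     start = 0
--     current_number = None
--
--     for i, c in enumerate(engine_str):
--         if c.isdigit():
--             if current_number:
--                 current_number += c
--             else:
--                 start = i
--                 current_number = c
--         else:
--             if current_number:
--                 parts.append((current_number, start))
--                 current_number = None
--             if c not in ".\n":
--                 symbols.append((c, i))
--     return parts, symbols
-- ===== SOURCE B (Python) =====
-- def find_parts_symbols(engine_str):
--     # Two independent passes: a comprehension for symbols and an index-jump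
--     # scan (with slicing) for digit runs. Unlike A, a number that runs to the
--     # very end of the string is included (A drops it).
--     symbols = [(c, i) for i, c in enumerate(engine_str)
--                if not c.isdigit() and c not in ".\n"]
--     parts = []
--     i, n = 0, len(engine_str)
--     while i < n:
--         if engine_str[i].isdigit():
--             j = i + 1
--             while j < n and engine_str[j].isdigit():
--                 j += 1
--             parts.append((engine_str[i:j], i))
--             i = j
--         else:
--             i += 1
--     return parts, symbols
-- ===== Notes on version B (the rewrite author's own statement) =====
-- stated objective: idiomatic
-- what changed: A's single-pass state machine (accumulating current_number char by char with start/None bookkeeping) is replaced by two independent passes: a comprehension for symbols and an index-jump scan that slices out whole digit runs; B also keeps a number that reaches the end of the string, which A drops.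
-- intended difference: On strings whose last character is a digit, A returns the parts list without the final number (its pending current_number is never flushed), while B includes that final number with its start index, which is the intended behaviour for parsing part numbers. — e.g. on find_parts_symbols("46*7"): A returns ([("46", 0)], [("*", 2)]), B returns ([("46", 0), ("7", 3)], [("*", 2)])
import Mathlib
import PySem

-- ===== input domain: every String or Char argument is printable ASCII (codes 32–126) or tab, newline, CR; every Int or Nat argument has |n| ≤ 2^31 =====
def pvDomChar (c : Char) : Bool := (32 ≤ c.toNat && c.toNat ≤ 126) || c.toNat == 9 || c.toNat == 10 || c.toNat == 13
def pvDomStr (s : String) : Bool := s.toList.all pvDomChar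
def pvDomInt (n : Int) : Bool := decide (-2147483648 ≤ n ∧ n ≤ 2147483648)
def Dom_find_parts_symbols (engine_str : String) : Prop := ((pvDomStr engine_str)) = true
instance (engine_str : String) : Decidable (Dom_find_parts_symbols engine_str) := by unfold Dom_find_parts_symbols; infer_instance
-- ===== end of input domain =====

-- B replaces A's single-pass current_number state machine by two independent passes
-- (a symbol filter and a digit-run scan) and keeps a trailing number A drops.

-- ===== PORT A =====
-- A's for-loop over enumerate(engine_str) with state (start, current_number, parts, symbols).
def goA (l : List Char) (i start : Int) (cur : Option (List Char))
    (parts symbols : List (String × Int)) : (List (String × Int)) × (List (String × Int)) :=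
  match l with
  | [] => (parts, symbols)
  | c :: rest =>
    if PySem.Chars.isdigit c then
      match cur with
      | some ds => goA rest (i + 1) start (some (ds ++ [c])) parts symbols
      | none    => goA rest (i + 1) i (some [c]) parts symbols
    else
      let parts' := match cur with
        | some ds => parts ++ [(String.mk ds, start)]
        | none    => parts
      let symbols' := if c ≠ '.' ∧ c ≠ '\n' then symbols ++ [(String.mk [c], i)] else symbols
      goA rest (i + 1) start none parts' symbols'

def find_parts_symbols (engine_str : String) : (List (String × Int)) × (List (String × Int)) :=
  goA engine_str.toList 0 0 none [] []

-- ===== PORT B =====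
-- B's symbol comprehension: filter over enumerate(engine_str).
def symsB (l : List Char) (i : Int) : List (String × Int) :=
  match l with
  | [] => []
  | c :: rest =>
    if ¬ PySem.Chars.isdigit c ∧ c ≠ '.' ∧ c ≠ '\n'
    then (String.mk [c], i) :: symsB rest (i + 1)
    else symsB rest (i + 1)

-- B's index-jump while loop: slice out each whole digit run.
def partsB (l : List Char) (i : Int) : List (String × Int) :=
  match l with
  | [] => []
  | c :: rest =>
    if PySem.Chars.isdigit c then
      let run := rest.takeWhile PySem.Chars.isdigit
      (String.mk (c :: run), i) ::
        partsB (rest.dropWhile PySem.Chars.isdigit) (i + 1 + (run.length : Int))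
    else partsB rest (i + 1)
termination_by l.length
decreasing_by
  · exact Nat.lt_succ_of_le (List.length_dropWhile_le _ _)
  · simp

def find_parts_symbols_alt (engine_str : String) : (List (String × Int)) × (List (String × Int)) :=
  (partsB engine_str.toList 0, symsB engine_str.toList 0)

-- ===== PRECONDITION & SPEC =====
-- On strings whose last character is a digit, A returns the parts list without the final
-- number (its pending current_number is never flushed), while B includes that final number
-- with its start index, which is the intended behaviour for parsing part numbers.
def D_find_parts_symbols (engine_str : String) : Prop :=
  engine_str.toList.getLast?.any PySem.Chars.isdigit = true
instance (engine_str : String) : Decidable (D_find_parts_symbols engine_str) := by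
  unfold D_find_parts_symbols; infer_instance

def Spec_find_parts_symbols (engine_str : String) (out : (List (String × Int)) × (List (String × Int))) : Prop :=
  ¬ D_find_parts_symbols engine_str → out = find_parts_symbols_alt engine_str
instance (engine_str : String) (out : (List (String × Int)) × (List (String × Int))) : Decidable (Spec_find_parts_symbols engine_str out) := by
  unfold Spec_find_parts_symbols; infer_instance

def pvDiffWitness_find_parts_symbols : String := "46*7"
def pvDiffWitnessOut_find_parts_symbols :
    ((List (String × Int)) × (List (String × Int))) × ((List (String × Int)) × (List (String × Int))) :=
  (([("46", 0)], [("*", 2)]), ([("46", 0), ("7", 3)], [("*", 2)]))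

-- ===== CLAIM (what is proved, stated in full; the proofs are below) =====
def Claim_unchanged_find_parts_symbols : Prop := ∀ (engine_str : String), Dom_find_parts_symbols engine_str → Spec_find_parts_symbols engine_str (find_parts_symbols engine_str)
def Claim_changed_find_parts_symbols : Prop := Dom_find_parts_symbols (pvDiffWitness_find_parts_symbols) ∧ D_find_parts_symbols (pvDiffWitness_find_parts_symbols) ∧ find_parts_symbols (pvDiffWitness_find_parts_symbols) = pvDiffWitnessOut_find_parts_symbols.1 ∧ find_parts_symbols_alt (pvDiffWitness_find_parts_symbols) = pvDiffWitnessOut_find_parts_symbols.2 ∧ pvDiffWitnessOut_find_parts_symbols.1 ≠ pvDiffWitnessOut_find_parts_symbols.2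
def Claim_exact_find_parts_symbols : Prop := ∀ (engine_str : String), Dom_find_parts_symbols engine_str → D_find_parts_symbols engine_str → find_parts_symbols engine_str ≠ find_parts_symbols_alt engine_str

-- ===== LEMMAS AND PROOFS =====

-- A's parts result, characterised as a digit-run scan that DROPS a trailing run.
def apA (l : List Char) (i : Int) : List (String × Int) :=
  match l with
  | [] => []
  | c :: rest =>
    if PySem.Chars.isdigit c then
      let run := rest.takeWhile PySem.Chars.isdigit
      if rest.dropWhile PySem.Chars.isdigit = [] then []
      else (String.mk (c :: run), i) ::
        apA (rest.dropWhile PySem.Chars.isdigit) (i + 1 + (run.length : Int))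
    else apA rest (i + 1)
termination_by l.length
decreasing_by
  · exact Nat.lt_succ_of_le (List.length_dropWhile_le _ _)
  · simp

lemma symsB_digits (run : List Char) (t : List Char) (i : Int)
    (h : ∀ c ∈ run, PySem.Chars.isdigit c) :
    symsB (run ++ t) i = symsB t (i + (run.length : Int)) := by
  induction run generalizing i with
  | nil => simp [symsB]
  | cons c rest ih =>
    have hc : PySem.Chars.isdigit c := h c (by simp)
    simp only [List.cons_append, symsB, hc]
    rw [if_neg (by simp [hc]), ih _ (fun d hd => h d (by simp [hd]))]
    congr 1
    simp only [List.length_cons]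
    push_cast
    ring

lemma goA_some (l : List Char) : ∀ (i start : Int) (ds : List Char)
    (parts syms : List (String × Int)),
    goA l i start (some ds) parts syms =
      if l.dropWhile PySem.Chars.isdigit = [] then (parts, syms)
      else goA (l.dropWhile PySem.Chars.isdigit)
        (i + ((l.takeWhile PySem.Chars.isdigit).length : Int)) start none
        (parts ++ [(String.mk (ds ++ l.takeWhile PySem.Chars.isdigit), start)]) syms := by
  induction l with
  | nil => intro i start ds parts syms; simp [goA]
  | cons c rest ih =>
    intro i start ds parts syms
    by_cases hc : PySem.Chars.isdigit c
    · simp only [goA, hc, if_pos, List.dropWhile_cons, List.takeWhile_cons]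
      rw [ih]
      by_cases hr : rest.dropWhile PySem.Chars.isdigit = []
      · simp [hr]
      · rw [if_neg hr, if_neg hr]
        have e1 : i + 1 + (((List.takeWhile PySem.Chars.isdigit rest).length : Nat) : Int)
            = i + (((c :: List.takeWhile PySem.Chars.isdigit rest).length : Nat) : Int) := by
          simp only [List.length_cons]
          push_cast
          ring
        have e2 : (ds ++ [c]) ++ List.takeWhile PySem.Chars.isdigit rest
            = ds ++ c :: List.takeWhile PySem.Chars.isdigit rest := by simp
        rw [e1, e2]
    · have hcf : PySem.Chars.isdigit c = false := by
        simpa using hc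
      have hd : (c :: rest).dropWhile PySem.Chars.isdigit = c :: rest := by
        simp [List.dropWhile_cons, hcf]
      have ht : (c :: rest).takeWhile PySem.Chars.isdigit = [] := by
        simp [List.takeWhile_cons, hcf]
      rw [hd, ht, if_neg (List.cons_ne_nil c rest)]
      simp [goA, hcf]

lemma goA_none_aux : ∀ (n : Nat) (l : List Char), l.length ≤ n →
    ∀ (i start : Int) (parts syms : List (String × Int)),
    goA l i start none parts syms = (parts ++ apA l i, syms ++ symsB l i) := by
  intro n
  induction n with
  | zero =>
    intro l hl i start parts syms
    have : l = [] := List.length_eq_zero_iff.mp (Nat.le_zero.mp hl)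
    subst this; simp [goA, apA, symsB]
  | succ n ih =>
    intro l hl i start parts syms
    match l with
    | [] => simp [goA, apA, symsB]
    | c :: rest =>
      by_cases hc : PySem.Chars.isdigit c
      · simp only [goA, hc, if_pos]
        rw [goA_some]
        have hsplit : rest = rest.takeWhile PySem.Chars.isdigit ++ rest.dropWhile PySem.Chars.isdigit :=
          (List.takeWhile_append_dropWhile).symm
        by_cases hr : rest.dropWhile PySem.Chars.isdigit = []
        · rw [if_pos hr]
          have hrt : rest = rest.takeWhile PySem.Chars.isdigit := by
            conv_lhs => rw [hsplit]
            rw [hr, List.append_nil]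
          have hall : ∀ d ∈ (c :: rest), PySem.Chars.isdigit d := by
            intro d hd
            rcases List.mem_cons.mp hd with h | h
            · exact h ▸ hc
            · rw [hrt] at h
              exact List.mem_takeWhile_imp h
          have hsy : symsB (c :: rest) i = [] := by
            have := symsB_digits (c :: rest) [] i hall
            simpa [symsB] using this
          simp [apA, hc, hr, hsy]
        · rw [if_neg hr]
          have hlen : (rest.dropWhile PySem.Chars.isdigit).length ≤ n := by
            have h1 := List.length_dropWhile_le PySem.Chars.isdigit rest
            simp only [List.length_cons] at hl
            omega
          rw [ih _ hlen]
          have hap : apA (c :: rest) i =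
              (String.mk (c :: rest.takeWhile PySem.Chars.isdigit), i) ::
                apA (rest.dropWhile PySem.Chars.isdigit)
                  (i + 1 + ((rest.takeWhile PySem.Chars.isdigit).length : Int)) := by
            simp [apA, hc, hr]
          have hsy : symsB (c :: rest) i =
              symsB (rest.dropWhile PySem.Chars.isdigit)
                ((i + 1) + ((rest.takeWhile PySem.Chars.isdigit).length : Int)) := by
            have h1 : symsB (c :: rest) i = symsB rest (i + 1) := by simp [symsB, hc]
            rw [h1]
            conv_lhs => rw [hsplit]
            rw [symsB_digits _ _ _ (fun d hd => List.mem_takeWhile_imp hd)]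
          rw [hap, hsy]
          simp [add_assoc]
      · simp only [goA, hc, Bool.false_eq_true, if_false]
        have hlen : rest.length ≤ n := by simp only [List.length_cons] at hl; omega
        rw [ih _ hlen]
        simp only [apA, hc, Bool.false_eq_true, if_false, symsB]
        by_cases hs : c ≠ '.' ∧ c ≠ '\n'
        · rw [if_pos hs, if_pos ⟨not_false, hs.1, hs.2⟩]
          simp
        · rw [if_neg hs, if_neg (fun h => hs ⟨h.2.1, h.2.2⟩)]

lemma goA_none (l : List Char) (i start : Int) (parts syms : List (String × Int)) :
    goA l i start none parts syms = (parts ++ apA l i, syms ++ symsB l i) :=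
  goA_none_aux l.length l le_rfl i start parts syms

lemma getLast?_cons_of_ne_nil {α : Type} (c : α) {l : List α} (h : l ≠ []) :
    (c :: l).getLast? = l.getLast? := by
  cases l with
  | nil => exact absurd rfl h
  | cons d t => simp [List.getLast?_cons_cons]

lemma last_drop (c : Char) (rest : List Char)
    (hr : rest.dropWhile PySem.Chars.isdigit ≠ []) :
    (c :: rest).getLast? = (rest.dropWhile PySem.Chars.isdigit).getLast? := by
  have hne : rest ≠ [] := by
    intro h; subst h; simp [List.dropWhile] at hr
  rw [getLast?_cons_of_ne_nil c hne]
  conv_lhs => rw [← List.takeWhile_append_dropWhile (p := PySem.Chars.isdigit) (l := rest)]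
  exact List.getLast?_append_of_ne_nil _ hr

lemma apA_eq_partsB : ∀ (n : Nat) (l : List Char), l.length ≤ n →
    l.getLast?.any PySem.Chars.isdigit ≠ true → ∀ i, apA l i = partsB l i := by
  intro n
  induction n with
  | zero =>
    intro l hl _ i
    have : l = [] := List.length_eq_zero_iff.mp (Nat.le_zero.mp hl)
    subst this; simp [apA, partsB]
  | succ n ih =>
    intro l hl hlast i
    match l with
    | [] => simp [apA, partsB]
    | c :: rest =>
      by_cases hc : PySem.Chars.isdigit c
      · by_cases hr : rest.dropWhile PySem.Chars.isdigit = []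
        · exfalso
          apply hlast
          have hrt : rest = rest.takeWhile PySem.Chars.isdigit := by
            conv_lhs => rw [← List.takeWhile_append_dropWhile (p := PySem.Chars.isdigit) (l := rest)]
            rw [hr, List.append_nil]
          have hall : ∀ x ∈ rest, PySem.Chars.isdigit x := by
            intro x hx
            rw [hrt] at hx
            exact List.mem_takeWhile_imp hx
          obtain ⟨y, hy⟩ := Option.isSome_iff_exists.mp
            (List.getLast?_isSome.mpr (List.cons_ne_nil c rest))
          rw [hy]
          have hmem : y ∈ c :: rest := List.mem_of_getLast? hy
          rcases List.mem_cons.mp hmem with h | h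
          · simp [h, hc]
          · simp [hall y h]
        · have hlen : (rest.dropWhile PySem.Chars.isdigit).length ≤ n := by
            have := List.length_dropWhile_le PySem.Chars.isdigit rest
            simp only [List.length_cons] at hl
            omega
          have hlast' : (rest.dropWhile PySem.Chars.isdigit).getLast?.any PySem.Chars.isdigit ≠ true := by
            rw [← last_drop c rest hr]; exact hlast
          simp only [apA, partsB, hc, if_pos, if_neg hr]
          rw [ih _ hlen hlast']
      · simp only [apA, partsB, hc, Bool.false_eq_true, if_false]
        cases rest with
        | nil => simp [apA, partsB]
        | cons d t =>
          apply ih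
          · simp only [List.length_cons] at hl ⊢; omega
          · rw [← getLast?_cons_of_ne_nil c (List.cons_ne_nil d t)]; exact hlast

lemma partsB_len : ∀ (n : Nat) (l : List Char), l.length ≤ n →
    l.getLast?.any PySem.Chars.isdigit = true →
    ∀ i, (partsB l i).length = (apA l i).length + 1 := by
  intro n
  induction n with
  | zero =>
    intro l hl hlast _
    have : l = [] := List.length_eq_zero_iff.mp (Nat.le_zero.mp hl)
    subst this; simp at hlast
  | succ n ih =>
    intro l hl hlast i
    match l with
    | [] => simp at hlast
    | c :: rest =>
      by_cases hc : PySem.Chars.isdigit c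
      · by_cases hr : rest.dropWhile PySem.Chars.isdigit = []
        · simp [partsB, apA, hc, hr]
        · have hlen : (rest.dropWhile PySem.Chars.isdigit).length ≤ n := by
            have := List.length_dropWhile_le PySem.Chars.isdigit rest
            simp only [List.length_cons] at hl
            omega
          have hlast' : (rest.dropWhile PySem.Chars.isdigit).getLast?.any PySem.Chars.isdigit = true := by
            rw [← last_drop c rest hr]; exact hlast
          simp only [partsB, apA, hc, if_pos, if_neg hr, List.length_cons]
          rw [ih _ hlen hlast']
      · simp only [partsB, apA, hc, Bool.false_eq_true, if_false]
        cases rest with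
        | nil =>
          simp [hc] at hlast
        | cons d t =>
          apply ih
          · simp only [List.length_cons] at hl ⊢; omega
          · rw [← getLast?_cons_of_ne_nil c (List.cons_ne_nil d t)]; exact hlast

-- ===== VERDICT (by name: the statement is the Claim_ definition above) =====
theorem find_parts_symbols_spec : Claim_unchanged_find_parts_symbols := by
  intro s _ hD
  unfold D_find_parts_symbols at hD
  show find_parts_symbols s = find_parts_symbols_alt s
  unfold find_parts_symbols find_parts_symbols_alt
  rw [goA_none]
  simp only [List.nil_append]
  rw [apA_eq_partsB s.toList.length s.toList le_rfl hD]

theorem find_parts_symbols_changed : Claim_changed_find_parts_symbols := by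
  unfold Claim_changed_find_parts_symbols
  refine ⟨by decide, by decide, by decide, ?_, by decide⟩
  show find_parts_symbols_alt pvDiffWitness_find_parts_symbols = _
  unfold find_parts_symbols_alt pvDiffWitness_find_parts_symbols pvDiffWitnessOut_find_parts_symbols
  have h : ("46*7" : String).toList = ['4', '6', '*', '7'] := by decide
  rw [h]
  have d4 : PySem.Chars.isdigit '4' = true := by decide
  have d6 : PySem.Chars.isdigit '6' = true := by decide
  have d7 : PySem.Chars.isdigit '7' = true := by decide
  have ds : PySem.Chars.isdigit '*' = false := by decide
  simp [partsB, symsB, d4, d6, d7, ds]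
  decide

theorem find_parts_symbols_tight : Claim_exact_find_parts_symbols := by
  intro s _ hD heq
  unfold D_find_parts_symbols at hD
  have h1 : (find_parts_symbols s).1 = (find_parts_symbols_alt s).1 := by rw [heq]
  unfold find_parts_symbols find_parts_symbols_alt at h1
  rw [goA_none] at h1
  simp only [List.nil_append] at h1
  have := partsB_len s.toList.length s.toList le_rfl hD 0
  rw [← h1] at this
  omega
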